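-- pv_equiv track=rewrite | github.com/davmacario/aoc | 2023/day12/d12.py | checkValidSpring
-- ===== SOURCE A (Python) =====
-- from typing import List
--
-- def checkValidSpring(spr: str, cond: List) -> bool:
--     """Check if the current spring is valid"""
--     damaged_regions = [x for x in spr.split(".") if x != ""]
--
--     if len(damaged_regions) != len(cond):
--         return False
--
--     for i in range(len(damaged_regions)):
--         if len(damaged_regions[i]) != int(cond[i]):
--             return False
--
--     return True
-- ===== SOURCE B (Python) =====
-- def checkValidSpring(spr: str, cond) -> bool:
--     """One left-to-right pass: maintain the current run of non-'.' chars and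
--     match finished runs against cond in order, with no intermediate list."""
--     j = 0
--     run = 0
--     for ch in spr:
--         if ch != '.':
--             run += 1
--         else:
--             if run > 0:
--                 if j == len(cond) or run != int(cond[j]):
--                     return False
--                 j += 1
--             run = 0
--     if run > 0:
--         if j == len(cond) or run != int(cond[j]):
--             return False
--         j += 1
--     return j == len(cond)
-- ===== Notes on version B (the rewrite author's own statement) =====
-- stated objective: alternative
-- what changed: Replaces split('.')+filter+indexed comparison loop with a single character-by-character scan that maintains the current run length and a cursor into cond, comparing each finished run immediately.
import Mathlib
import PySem

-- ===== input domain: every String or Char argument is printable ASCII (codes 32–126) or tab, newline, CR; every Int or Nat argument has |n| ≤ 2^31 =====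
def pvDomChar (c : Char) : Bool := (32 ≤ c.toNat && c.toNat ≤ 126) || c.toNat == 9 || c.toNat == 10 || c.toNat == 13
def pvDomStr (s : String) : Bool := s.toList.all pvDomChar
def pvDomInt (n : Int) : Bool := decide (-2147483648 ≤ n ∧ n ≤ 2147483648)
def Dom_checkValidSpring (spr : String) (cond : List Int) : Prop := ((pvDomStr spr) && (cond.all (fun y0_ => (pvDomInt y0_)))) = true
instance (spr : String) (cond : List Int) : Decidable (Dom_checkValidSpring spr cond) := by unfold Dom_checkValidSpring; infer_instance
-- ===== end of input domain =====

-- B replaces split('.')+filter+indexed loop with a single streaming scan over the characters (objective: alternative decomposition).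

-- ===== PORT A =====
-- the 'for i in range(len(damaged_regions))' loop: return False on the first length mismatch
-- (int(cond[i]) is the identity here since cond carries Ints)
def checkValidSpringGo (regs : List (List Char)) (cond : List Int) (i : Nat) : Bool :=
  if h : i < regs.length then
    if ((regs.get ⟨i, h⟩).length : Int) ≠ cond.getD i 0 then false
    else checkValidSpringGo regs cond (i + 1)
  else true
termination_by regs.length - i

-- damaged_regions = [x for x in spr.split(".") if x != ""]
def checkValidSpring (spr : String) (cond : List Int) : Bool :=
  let damaged_regions := (PySem.Chars.splitOn spr.toList ['.']).filter (fun x => x ≠ [])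
  if damaged_regions.length ≠ cond.length then false
  else checkValidSpringGo damaged_regions cond 0

-- ===== PORT B =====
-- streaming scan: run = current run of non-'.' chars, j = cursor into cond
def checkValidSpringAltGo (cond : List Int) : List Char → Nat → Nat → Bool
  | [], run, j =>
      if run > 0 then
        if j = cond.length ∨ (run : Int) ≠ cond.getD j 0 then false
        else j + 1 = cond.length
      else j = cond.length
  | c :: rest, run, j =>
      if c ≠ '.' then checkValidSpringAltGo cond rest (run + 1) j
      else if run > 0 then
        if j = cond.length ∨ (run : Int) ≠ cond.getD j 0 then false
        else checkValidSpringAltGo cond rest 0 (j + 1)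
      else checkValidSpringAltGo cond rest 0 j

def checkValidSpring_alt (spr : String) (cond : List Int) : Bool :=
  checkValidSpringAltGo cond spr.toList 0 0

-- ===== PRECONDITION & SPEC =====
def Spec_checkValidSpring (spr : String) (cond : List Int) (out : Bool) : Prop := out = checkValidSpring_alt spr cond
instance (spr : String) (cond : List Int) (out : Bool) : Decidable (Spec_checkValidSpring spr cond out) := by unfold Spec_checkValidSpring; infer_instance

-- ===== CLAIM (what is proved, stated in full; the proofs are below) =====
def Claim_equal_checkValidSpring : Prop := ∀ (spr : String) (cond : List Int), Dom_checkValidSpring spr cond → Spec_checkValidSpring spr cond (checkValidSpring spr cond)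

-- ===== LEMMAS AND PROOFS =====

-- a direct structural recursion computing spr.split('.') with `cur` the reversed current chunk
def pvSplitAux : List Char → List Char → List (List Char)
  | [], cur => [cur.reverse]
  | c :: rest, cur => if c = '.' then cur.reverse :: pvSplitAux rest [] else pvSplitAux rest (c :: cur)

-- the run lengths B's scan consumes, with `run` the length of the current open run
def pvRuns : List Char → Nat → List Nat
  | [], run => if run > 0 then [run] else []
  | c :: rest, run =>
      if c ≠ '.' then pvRuns rest (run + 1)
      else if run > 0 then run :: pvRuns rest 0 else pvRuns rest 0

theorem pvGo_nil (fuel : Nat) (cur : List Char) (acc : List (List Char)) :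
    PySem.Chars.splitOn.go ['.'] (fuel + 1) [] cur acc = (cur.reverse :: acc).reverse := by
  rw [PySem.Chars.splitOn.go]
  omega

theorem pvGo_cons (fuel : Nat) (c : Char) (rest cur : List Char) (acc : List (List Char)) :
    PySem.Chars.splitOn.go ['.'] (fuel + 1) (c :: rest) cur acc =
      if c = '.' then PySem.Chars.splitOn.go ['.'] fuel rest [] (cur.reverse :: acc)
      else PySem.Chars.splitOn.go ['.'] fuel rest (c :: cur) acc := by
  rw [PySem.Chars.splitOn.go]
  have hpre : (['.'] : List Char).isPrefixOf (c :: rest) = (c == '.') := by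
    simp [List.isPrefixOf, BEq.comm]
  by_cases hc : c = '.'
  · subst hc
    simp [hpre]
  · simp [hpre, hc]

theorem pvGo_spec : ∀ (fuel : Nat) (l cur : List Char) (acc : List (List Char)), l.length < fuel →
      PySem.Chars.splitOn.go ['.'] fuel l cur acc = acc.reverse ++ pvSplitAux l cur := by
  intro fuel
  induction fuel with
  | zero => intro l cur acc h; omega
  | succ n ih =>
    intro l cur acc h
    cases l with
    | nil => rw [pvGo_nil]; simp [pvSplitAux]
    | cons c rest =>
      rw [pvGo_cons]
      by_cases hc : c = '.'
      · rw [if_pos hc, ih _ _ _ (by simpa using Nat.lt_of_succ_lt_succ h)]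
        simp [pvSplitAux, hc]
      · rw [if_neg hc, ih _ _ _ (by simpa using Nat.lt_of_succ_lt_succ h)]
        simp [pvSplitAux, hc]

theorem pvSplitOn_eq (cs : List Char) :
    PySem.Chars.splitOn cs ['.'] = pvSplitAux cs [] := by
  show PySem.Chars.splitOn.go ['.'] (cs.length + 1) cs [] [] = _
  rw [pvGo_spec (cs.length + 1) cs [] [] (by omega)]
  simp

-- filtered chunk lengths = run lengths
theorem pvFilter_runs (cs : List Char) : ∀ cur,
    ((pvSplitAux cs cur).filter (fun x => x ≠ [])).map List.length = pvRuns cs cur.length := by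
  induction cs with
  | nil =>
    intro cur
    cases cur <;> simp [pvSplitAux, pvRuns]
  | cons c rest ih =>
    intro cur
    by_cases hc : c = '.'
    · subst hc
      cases cur with
      | nil =>
        simp [pvSplitAux, pvRuns]
        simpa using ih []
      | cons d ds =>
        simp [pvSplitAux, pvRuns]
        simpa using ih []
    · simpa [pvSplitAux, pvRuns, hc] using ih (c :: cur)

-- A's index loop checks pointwise equality of the tails
theorem pvAGo_spec (regs : List (List Char)) (cond : List Int) (hlen : regs.length = cond.length) :
    ∀ i, checkValidSpringGo regs cond i =
      decide ((regs.drop i).map (fun r => (r.length : Int)) = cond.drop i) := by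
  intro i
  induction hn : regs.length - i using Nat.strong_induction_on generalizing i with
  | _ n ih =>
    rw [checkValidSpringGo]
    by_cases h : i < regs.length
    · have hic : i < cond.length := by omega
      rw [dif_pos h]
      have hd1 : regs.drop i = regs[i] :: regs.drop (i + 1) := List.drop_eq_getElem_cons h
      have hd2 : cond.drop i = cond[i] :: cond.drop (i + 1) := List.drop_eq_getElem_cons hic
      have hgd : cond.getD i 0 = cond[i] := by simp [List.getD_eq_getElem?_getD, hic]
      by_cases hm : ((regs.get ⟨i, h⟩).length : Int) ≠ cond.getD i 0
      · rw [if_pos hm]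
        rw [hgd] at hm
        simp only [List.get_eq_getElem] at hm
        symm
        apply decide_eq_false
        intro hP
        rw [hd1, hd2, List.map_cons] at hP
        exact hm (List.cons_eq_cons.mp hP).1
      · rw [if_neg hm]
        push_neg at hm
        rw [hgd] at hm
        simp only [List.get_eq_getElem] at hm
        rw [ih (regs.length - (i + 1)) (by omega) (i + 1) rfl]
        apply decide_eq_decide.mpr
        rw [hd1, hd2, List.map_cons, List.cons_eq_cons]
        constructor
        · intro ha; exact ⟨hm, ha⟩
        · intro ha; exact ha.2
    · rw [dif_neg h]
      have h1 : regs.drop i = [] := List.drop_eq_nil_of_le (by omega)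
      have h2 : cond.drop i = [] := List.drop_eq_nil_of_le (by omega)
      simp [h1, h2]

-- A = "cond equals the run lengths"
theorem pvA_char (spr : String) (cond : List Int) :
    checkValidSpring spr cond =
      decide (cond = (pvRuns spr.toList 0).map Int.ofNat) := by
  unfold checkValidSpring
  set regs := (PySem.Chars.splitOn spr.toList ['.']).filter (fun x => x ≠ []) with hregs
  have hr : regs.map List.length = pvRuns spr.toList 0 := by
    rw [hregs, pvSplitOn_eq]
    simpa using pvFilter_runs spr.toList []
  have hmap : regs.map (fun r => (r.length : Int)) = (pvRuns spr.toList 0).map Int.ofNat := by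
    rw [← hr, List.map_map]
    rfl
  by_cases hl : regs.length ≠ cond.length
  · rw [if_pos hl]
    symm
    apply decide_eq_false
    intro hc
    apply hl
    have h1 : cond.length = (pvRuns spr.toList 0).length := by rw [hc, List.length_map]
    have h2 : regs.length = (pvRuns spr.toList 0).length := by rw [← hr, List.length_map]
    omega
  · rw [if_neg hl]
    push_neg at hl
    rw [pvAGo_spec regs cond hl 0]
    apply decide_eq_decide.mpr
    rw [List.drop_zero, List.drop_zero, hmap, eq_comm]

-- cond.drop j cannot start with run when A's matching of region j fails
theorem pvDropNe (cond : List Int) (j run : Nat) (rest : List Int) (hj : j ≤ cond.length)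
    (hm : j = cond.length ∨ (run : Int) ≠ cond.getD j 0) :
    cond.drop j ≠ (run : Int) :: rest := by
  intro hP
  have hlt : j < cond.length := by
    rcases Nat.lt_or_ge j cond.length with h | h
    · exact h
    · rw [List.drop_eq_nil_of_le h] at hP
      exact absurd hP.symm (List.cons_ne_nil _ _)
  have hd : cond.drop j = cond[j] :: cond.drop (j + 1) := List.drop_eq_getElem_cons hlt
  have hgd : cond.getD j 0 = cond[j] := by simp [List.getD_eq_getElem?_getD, hlt]
  rw [hd] at hP
  have h1 : cond[j] = (run : Int) := (List.cons_eq_cons.mp hP).1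
  rcases hm with hjl | hne
  · omega
  · exact hne (hgd.trans h1).symm

-- B's scan checks that the remaining cond equals the remaining run lengths
theorem pvBGo_spec (cond : List Int) : ∀ (cs : List Char) (run j : Nat), j ≤ cond.length →
      checkValidSpringAltGo cond cs run j =
        decide (cond.drop j = (pvRuns cs run).map Int.ofNat) := by
  intro cs
  induction cs with
  | nil =>
    intro run j hj
    rw [checkValidSpringAltGo]
    by_cases hrun : run > 0
    · rw [if_pos hrun]
      unfold pvRuns
      rw [if_pos hrun]
      by_cases hm : j = cond.length ∨ (run : Int) ≠ cond.getD j 0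
      · rw [if_pos hm]
        symm
        apply decide_eq_false
        exact fun hP => pvDropNe cond j run [] hj hm
          (by rw [List.map_singleton, Int.ofNat_eq_natCast] at hP; exact hP)
      · rw [if_neg hm]
        push_neg at hm
        obtain ⟨hjl, heq⟩ := hm
        have hlt : j < cond.length := lt_of_le_of_ne hj hjl
        have hd : cond.drop j = cond[j] :: cond.drop (j + 1) := List.drop_eq_getElem_cons hlt
        have hgd : cond.getD j 0 = cond[j] := by simp [List.getD_eq_getElem?_getD, hlt]
        apply decide_eq_decide.mpr
        rw [hd, List.map_singleton, List.cons_eq_cons]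
        constructor
        · intro h
          refine ⟨by rw [Int.ofNat_eq_natCast]; exact (heq.trans hgd).symm, ?_⟩
          exact List.drop_eq_nil_of_le (by omega)
        · intro ⟨_, h2⟩
          have := List.drop_eq_nil_iff.mp h2
          omega
    · rw [if_neg hrun]
      unfold pvRuns
      rw [if_neg hrun]
      apply decide_eq_decide.mpr
      simp only [List.map_nil]
      constructor
      · intro h; exact List.drop_eq_nil_of_le (by omega)
      · intro h
        have := List.drop_eq_nil_iff.mp h
        omega
  | cons c rest ih =>
    intro run j hj
    rw [checkValidSpringAltGo]
    by_cases hc : c = '.'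
    · rw [if_neg (not_not_intro hc)]
      unfold pvRuns
      rw [if_neg (not_not_intro hc)]
      by_cases hrun : run > 0
      · rw [if_pos hrun, if_pos hrun]
        by_cases hm : j = cond.length ∨ (run : Int) ≠ cond.getD j 0
        · rw [if_pos hm]
          symm
          apply decide_eq_false
          intro hP
          rw [List.map_cons, Int.ofNat_eq_natCast] at hP
          exact pvDropNe cond j run _ hj hm hP
        · rw [if_neg hm]
          push_neg at hm
          obtain ⟨hjl, heq⟩ := hm
          have hlt : j < cond.length := lt_of_le_of_ne hj hjl
          have hd : cond.drop j = cond[j] :: cond.drop (j + 1) := List.drop_eq_getElem_cons hlt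
          have hgd : cond.getD j 0 = cond[j] := by simp [List.getD_eq_getElem?_getD, hlt]
          rw [ih 0 (j + 1) (by omega)]
          apply decide_eq_decide.mpr
          rw [hd, List.map_cons, List.cons_eq_cons]
          constructor
          · intro h; exact ⟨by rw [Int.ofNat_eq_natCast]; exact (heq.trans hgd).symm, h⟩
          · intro h; exact h.2
      · rw [if_neg hrun, if_neg hrun]
        exact ih 0 j hj
    · rw [if_pos hc]
      unfold pvRuns
      rw [if_pos hc]
      exact ih (run + 1) j hj

theorem pvB_char (spr : String) (cond : List Int) :
    checkValidSpring_alt spr cond =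
      decide (cond = (pvRuns spr.toList 0).map Int.ofNat) := by
  unfold checkValidSpring_alt
  rw [pvBGo_spec cond spr.toList 0 0 (by omega)]
  rw [List.drop_zero]

-- ===== VERDICT (by name: the statement is the Claim_ definition above) =====
theorem checkValidSpring_spec : Claim_equal_checkValidSpring := by
  intro spr cond _
  unfold Spec_checkValidSpring
  rw [pvA_char, pvB_char]
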